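-- pv_equiv track=rewrite | github.com/MogaAlex/HilelMoha | Lesson11/Les11.3.py | is_even
-- ===== SOURCE A (Python) =====
-- def is_even(number: int) -> bool:
--     b = str(number)
--     list=[]
--     for i in b:
--         list.append(i)
--     if list[-1] == '0' or list[-1] == '2' or  list[-1]== '4' or list[-1]== '6' or list[-1]=='8':
--         return True
--     else:
--         return False
-- ===== SOURCE B (Python) =====
-- def is_even(number: int) -> bool:
--     return number % 2 == 0
-- ===== Notes on version B (the rewrite author's own statement) =====
-- stated objective: idiomatic
-- what changed: Replaces string conversion plus last-decimal-digit membership test with the direct modulo parity check.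
import Mathlib
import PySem

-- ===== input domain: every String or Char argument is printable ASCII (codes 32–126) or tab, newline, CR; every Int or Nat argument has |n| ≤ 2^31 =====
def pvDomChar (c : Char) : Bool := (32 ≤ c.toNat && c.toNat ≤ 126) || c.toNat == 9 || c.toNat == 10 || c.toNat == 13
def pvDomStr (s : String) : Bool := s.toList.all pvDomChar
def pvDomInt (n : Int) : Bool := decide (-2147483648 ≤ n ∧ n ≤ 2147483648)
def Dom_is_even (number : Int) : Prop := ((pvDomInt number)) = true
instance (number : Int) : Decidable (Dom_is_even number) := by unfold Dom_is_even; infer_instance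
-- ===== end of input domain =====

-- B replaces A's string-conversion/last-digit membership test with the direct modulo parity check (idiomatic).


-- ===== PORT A =====
-- str(number) is never empty, so list[-1] never raises; pyGetD's default ' ' is unreachable.
def is_even (number : Int) : Bool :=
  let b := PySem.Int.toStr number
  let lst := b.toList.foldl (fun acc i => acc ++ [i]) ([] : List Char)
  let last := PySem.List.pyGetD lst (-1) ' '
  if last = '0' ∨ last = '2' ∨ last = '4' ∨ last = '6' ∨ last = '8' then true else false

-- ===== PORT B =====
def is_even_alt (number : Int) : Bool :=
  decide (PySem.Int.mod number 2 = 0)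

-- ===== PRECONDITION & SPEC =====
def Spec_is_even (number : Int) (out : Bool) : Prop := out = is_even_alt number
instance (number : Int) (out : Bool) : Decidable (Spec_is_even number out) := by unfold Spec_is_even; infer_instance

-- ===== CLAIM (what is proved, stated in full; the proofs are below) =====
def Claim_equal_is_even : Prop := ∀ (number : Int), Dom_is_even number → Spec_is_even number (is_even number)

-- ===== LEMMAS AND PROOFS =====

-- toDigitsCore only prepends to its accumulator, so the last element survives.
theorem pv_core_getLast? (b : Nat) : ∀ (fuel n : Nat) (c : Char) (ds : List Char),
    (Nat.toDigitsCore b fuel n (c :: ds)).getLast? = (c :: ds).getLast? := by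
  intro fuel
  induction fuel with
  | zero => intro n c ds; simp [Nat.toDigitsCore]
  | succ f ih =>
    intro n c ds
    simp only [Nat.toDigitsCore]
    split
    · exact List.getLast?_cons_cons
    · rw [ih]; exact List.getLast?_cons_cons

-- the last character of the decimal representation is the digit of m % b
theorem pv_toDigits_getLast? (b m : Nat) :
    (Nat.toDigits b m).getLast? = some (Nat.digitChar (m % b)) := by
  show (Nat.toDigitsCore b (m + 1) m []).getLast? = _
  simp only [Nat.toDigitsCore]
  split
  · rfl
  · rw [pv_core_getLast?]; rfl

theorem pv_toChars_getLast? (n : Int) :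
    (PySem.Int.toChars n).getLast? = some (Nat.digitChar (n.natAbs % 10)) := by
  unfold PySem.Int.toChars
  split
  · have h := pv_toDigits_getLast? 10 n.natAbs
    cases hd : Nat.toDigits 10 n.natAbs with
    | nil => rw [hd] at h; simp at h
    | cons x xs =>
      rw [hd] at h
      rw [List.getLast?_cons_cons]
      exact h
  · have : n.toNat = n.natAbs := by omega
    rw [this, pv_toDigits_getLast?]

theorem pv_digit_even (m : Nat) :
    (Nat.digitChar (m % 10) = '0' ∨ Nat.digitChar (m % 10) = '2' ∨
     Nat.digitChar (m % 10) = '4' ∨ Nat.digitChar (m % 10) = '6' ∨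
     Nat.digitChar (m % 10) = '8') ↔ m % 2 = 0 := by
  have h10 : m % 10 < 10 := Nat.mod_lt _ (by omega)
  have h2 : m % 10 % 2 = m % 2 := Nat.mod_mod_of_dvd m (by norm_num)
  rw [← h2]
  generalize m % 10 = r at h10 ⊢
  interval_cases r <;> simp <;> decide

-- ===== VERDICT (by name: the statement is the Claim_ definition above) =====
theorem is_even_spec : Claim_equal_is_even := by
  intro number _
  unfold Spec_is_even is_even is_even_alt
  show (if PySem.List.pyGetD
          ((PySem.Int.toStr number).toList.foldl (fun acc i => acc ++ [i]) ([] : List Char))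
          (-1) ' ' = '0' ∨ _ = '2' ∨ _ = '4' ∨ _ = '6' ∨ _ = '8'
        then true else false) = decide (PySem.Int.mod number 2 = 0)
  have hfold : ∀ (xs : List Char),
      xs.foldl (fun acc i => acc ++ [i]) ([] : List Char) = xs := by
    intro xs; rw [PySem.List.foldl_append_singleton]; simp
  rw [hfold, PySem.Int.toList_toStr]
  have hlast := pv_toChars_getLast? number
  have hne : PySem.Int.toChars number ≠ [] := by
    intro h; rw [h] at hlast; simp at hlast
  rw [PySem.List.pyGetD_neg_one _ ' ' hne]
  have hgl : (PySem.Int.toChars number).getLast hne = Nat.digitChar (number.natAbs % 10) := by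
    have := List.getLast?_eq_some_getLast (l := PySem.Int.toChars number) hne
    rw [this] at hlast; exact Option.some.inj hlast
  rw [hgl]
  by_cases hE : number.natAbs % 2 = 0
  · rw [if_pos ((pv_digit_even number.natAbs).mpr hE)]
    have hdvd : (2 : Int) ∣ number :=
      Int.natAbs_dvd_natAbs.mp (Nat.dvd_of_mod_eq_zero hE)
    have hm : PySem.Int.mod number 2 = 0 := by
      rw [PySem.Int.mod_eq_zero_iff_dvd]; exact hdvd
    rw [hm]; decide
  · rw [if_neg (fun h => hE ((pv_digit_even number.natAbs).mp h))]
    have hm : PySem.Int.mod number 2 ≠ 0 := by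
      intro h
      rw [PySem.Int.mod_eq_zero_iff_dvd] at h
      exact hE (Nat.eq_zero_of_dvd_of_lt (Int.natAbs_dvd_natAbs.mpr h) (by omega) |> fun hh => by omega)
    exact (decide_eq_false hm).symm
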